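-- pv_equiv track=rewrite | github.com/iechevarria/sorting-visualizations | svg.py | get_swaps_and_straights
-- ===== SOURCE A (Python) =====
-- def get_swaps_and_straights(history):
--     # pad history at the beginning and end to make my life easier
--     padded_history = history.copy()
--     padded_history.insert(0, padded_history[0])
--     padded_history.append(padded_history[-1])
--
--     # transform the padded history into something a little more useful
--     movements = {
--         val: [(arr.index(val), i) for i, arr in enumerate(padded_history)]
--         for val in padded_history[0]
--     }
--     swaps = {
--         val: (
--             [((None, None), movement[0])]
--             + [(a, b) for a, b in zip(movement, movement[1:]) if a[0] != b[0]]
--             + [(movement[-1], (None, None))]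
--         )
--         for val, movement in movements.items()
--     }
--     straights = {
--         val: [(a[1], b[0]) for a, b in zip(swap, swap[1:]) if a[1] != b[0]]
--         for val, swap in swaps.items()
--     }
--
--     return swaps, straights
-- ===== SOURCE B (Python) =====
-- def get_swaps_and_straights(history):
--     # frame-major streaming pass: one walk over the padded frames, per-value last
--     # position kept in a dict; swap segments are appended as they occur.
--     frames = [history[0]] + history + [history[-1]]
--     swaps = {}
--     state = {}
--     for i, arr in enumerate(frames):
--         pos = {}
--         for j, x in enumerate(arr):
--             if x not in pos:
--                 pos[x] = j
--         if i == 0: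
--             for v in arr:
--                 if v not in swaps:
--                     swaps[v] = [((None, None), (pos[v], 0))]
--                     state[v] = (pos[v], 0)
--         else:
--             for v in swaps:
--                 p = pos[v]
--                 if p != state[v][0]:
--                     swaps[v] = swaps[v] + [(state[v], (p, i))]
--                 state[v] = (p, i)
--     for v in swaps:
--         swaps[v] = swaps[v] + [(state[v], (None, None))]
--     straights = {}
--     for v, swap in swaps.items():
--         straights[v] = [(a[1], b[0]) for a, b in zip(swap, swap[1:]) if a[1] != b[0]]
--     return swaps, straights
-- ===== Notes on version B (the rewrite author's own statement) =====
-- stated objective: alternative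
-- what changed: B inverts the loop nesting: instead of A's per-value movements lists built by repeated arr.index scans and then zipped/filtered, B makes one frame-major streaming pass over the padded frames, keeping a dict of each value's last (position, frame) and appending swap segments to each value's list the moment a position changes; sentinels are attached at init and after the pass.
-- outside the precondition, e.g. on get_swaps_and_straights([]): A raises IndexError, B raises IndexError; on get_swaps_and_straights([[1, 2], [3, 4]]): A raises ValueError, B raises KeyError
import Mathlib
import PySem

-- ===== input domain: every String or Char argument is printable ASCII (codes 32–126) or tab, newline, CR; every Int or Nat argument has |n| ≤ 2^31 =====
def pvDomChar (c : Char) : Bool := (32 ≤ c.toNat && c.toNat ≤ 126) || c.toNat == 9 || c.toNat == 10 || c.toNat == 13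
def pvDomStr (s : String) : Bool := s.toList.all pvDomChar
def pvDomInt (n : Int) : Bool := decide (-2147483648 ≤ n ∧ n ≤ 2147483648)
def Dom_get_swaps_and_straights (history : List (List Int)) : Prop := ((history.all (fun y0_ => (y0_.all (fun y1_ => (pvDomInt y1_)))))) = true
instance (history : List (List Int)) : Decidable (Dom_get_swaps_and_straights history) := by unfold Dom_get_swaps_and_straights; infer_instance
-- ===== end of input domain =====

-- B inverts A's loop nesting: one frame-major streaming pass with a per-value last-position
-- dict, appending swap segments as they occur (objective: alternative algorithm, same measured cost).

-- the tuple type of one swap/straight entry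
abbrev pvE : Type := (Option Int × Option Int) × (Option Int × Option Int)

-- ===== PORT A =====
-- (some pos, some frame) embeds a Python (int, int) tuple into the mixed tuple type the sentinels force
def pvLift (q : Int × Int) : Option Int × Option Int := (some q.1, some q.2)

-- [(arr.index(val), i) for i, arr in enumerate(padded_history)]
-- arr.index(val) raises ValueError when val ∉ arr: that input is excluded by Pre_, the .getD 0 is never the value there
def pvMovement (padded : List (List Int)) (v : Int) : List (Int × Int) :=
  (PySem.List.enumerate padded).map (fun q => ((((PySem.List.index? q.2 v).getD 0 : Nat) : Int), q.1))

-- [((None,None), m[0])] + [(a,b) for a,b in zip(m, m[1:]) if a[0] != b[0]] + [(m[-1], (None,None))]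
-- (m is never empty: padded always has ≥ 1 frame, so headD/getLastD defaults are never read)
def pvSwapOf (m : List (Int × Int)) : List pvE :=
  (((none, none) : Option Int × Option Int), pvLift (m.headD (0, 0))) ::
    (((m.zip m.tail).filter (fun q => decide (q.1.1 ≠ q.2.1))).map (fun q => (pvLift q.1, pvLift q.2))
      ++ [(pvLift (m.getLastD (0, 0)), ((none, none) : Option Int × Option Int))])

-- [(a[1], b[0]) for a, b in zip(swap, swap[1:]) if a[1] != b[0]]
def pvStraightOf (s : List pvE) : List pvE :=
  ((s.zip s.tail).filter (fun q => decide (q.1.2 ≠ q.2.1))).map (fun q => (q.1.2, q.2.1))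

def get_swaps_and_straights (history : List (List Int)) : (List (Int × List ((Option Int × Option Int) × (Option Int × Option Int)))) × (List (Int × List ((Option Int × Option Int) × (Option Int × Option Int)))) :=
  -- padded_history[0] / [-1] raise IndexError on empty history: excluded by Pre_, headD/getLastD defaults never read there
  let padded : List (List Int) := history.headD [] :: (history ++ [history.getLastD []])
  let movements : PySem.Dict Int (List (Int × Int)) :=
    (history.headD []).foldl (fun d v => d.insert v (pvMovement padded v)) PySem.Dict.empty
  let swaps : PySem.Dict Int (List pvE) :=
    movements.items.foldl (fun d q => d.insert q.1 (pvSwapOf q.2)) PySem.Dict.empty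
  let straights : PySem.Dict Int (List pvE) :=
    swaps.items.foldl (fun d q => d.insert q.1 (pvStraightOf q.2)) PySem.Dict.empty
  (swaps.items, straights.items)

-- ===== PORT B =====
-- pos = {}; for j, x in enumerate(arr): if x not in pos: pos[x] = j
def pvPosMap (arr : List Int) : PySem.Dict Int Int :=
  (PySem.List.enumerate arr).foldl
    (fun d q => if d.contains q.2 then d else d.insert q.2 q.1) PySem.Dict.empty

-- the i == 0 iteration: for v in arr: if v not in swaps: swaps[v] = [((None,None),(pos[v],0))]; state[v] = (pos[v],0)
def pvInitLoop (pos0 : PySem.Dict Int Int) (arr : List Int) :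
    PySem.Dict Int (List pvE) × PySem.Dict Int (Int × Int) :=
  arr.foldl (fun st v =>
      if st.1.contains v then st
      else (st.1.insert v [(((none, none) : Option Int × Option Int), (some (pos0.getD v 0), some 0))],
            st.2.insert v (pos0.getD v 0, 0)))
    (PySem.Dict.empty, PySem.Dict.empty)

-- body of 'for v in swaps:' inside the frame loop (pos[v] raises KeyError where A raises; excluded by Pre_)
def pvInnerStep (pos : PySem.Dict Int Int) (i : Int)
    (st2 : PySem.Dict Int (List pvE) × PySem.Dict Int (Int × Int)) (v : Int) :
    PySem.Dict Int (List pvE) × PySem.Dict Int (Int × Int) :=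
  let p := pos.getD v 0
  let s := st2.2.getD v (0, 0)
  ((if p ≠ s.1 then st2.1.modify v [] (fun l => l ++ [((some s.1, some s.2), (some p, some i))]) else st2.1),
   st2.2.insert v (p, i))

-- one frame of the streaming pass: compute the frame's position map once, then update every value
def pvFrameStep (st : PySem.Dict Int (List pvE) × PySem.Dict Int (Int × Int)) (q : Int × List Int) :
    PySem.Dict Int (List pvE) × PySem.Dict Int (Int × Int) :=
  (st.1.keys).foldl (pvInnerStep (pvPosMap q.2) q.1) st

-- [(a[1], b[0]) for a, b in zip(swap, swap[1:]) if a[1] != b[0]]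
def pvStraightB (s : List pvE) : List pvE :=
  ((s.zip s.tail).filter (fun q => decide (q.1.2 ≠ q.2.1))).map (fun q => (q.1.2, q.2.1))

def get_swaps_and_straights_alt (history : List (List Int)) : (List (Int × List ((Option Int × Option Int) × (Option Int × Option Int)))) × (List (Int × List ((Option Int × Option Int) × (Option Int × Option Int)))) :=
  -- history[0] / [-1] raise IndexError on empty history: excluded by Pre_, defaults never read there
  let frames : List (List Int) := history.headD [] :: (history ++ [history.getLastD []])
  let st0 := pvInitLoop (pvPosMap (history.headD [])) (history.headD [])
  let r := (PySem.List.enumerate frames.tail 1).foldl pvFrameStep st0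
  -- for v in swaps: swaps[v] = swaps[v] + [(state[v], (None, None))]
  let swaps := (r.1.keys).foldl
      (fun d v => d.modify v []
        (fun l => l ++ [((some (r.2.getD v (0, 0)).1, some (r.2.getD v (0, 0)).2),
                         ((none, none) : Option Int × Option Int))])) r.1
  let straights := swaps.items.foldl (fun d q => d.insert q.1 (pvStraightB q.2)) PySem.Dict.empty
  (swaps.items, straights.items)

-- ===== PRECONDITION & SPEC =====
-- Pre_ excludes exactly where A raises: empty history (IndexError on padded_history[0]) and a value
-- of history[0] missing from some frame (ValueError from arr.index).
def Pre_get_swaps_and_straights (history : List (List Int)) : Prop :=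
  history ≠ [] ∧ ∀ v ∈ history.headD [], ∀ arr ∈ history, v ∈ arr
instance (history : List (List Int)) : Decidable (Pre_get_swaps_and_straights history) := by
  unfold Pre_get_swaps_and_straights; infer_instance

def pvWitness_get_swaps_and_straights : List (List Int) := [[1, 2, 3], [2, 1, 3], [2, 3, 1]]

def Spec_get_swaps_and_straights (history : List (List Int)) (out : (List (Int × List ((Option Int × Option Int) × (Option Int × Option Int)))) × (List (Int × List ((Option Int × Option Int) × (Option Int × Option Int))))) : Prop := out = get_swaps_and_straights_alt history
instance (history : List (List Int)) (out : (List (Int × List ((Option Int × Option Int) × (Option Int × Option Int)))) × (List (Int × List ((Option Int × Option Int) × (Option Int × Option Int))))) : Decidable (Spec_get_swaps_and_straights history out) := by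
  unfold Spec_get_swaps_and_straights
  exact @instDecidableEqProd _ _ (@instDecidableEqList _ (by infer_instance))
    (@instDecidableEqList _ (by infer_instance)) _ _

-- ===== CLAIM (what is proved, stated in full; the proofs are below) =====
def Claim_equal_get_swaps_and_straights : Prop := ∀ (history : List (List Int)), Dom_get_swaps_and_straights history → Pre_get_swaps_and_straights history → Spec_get_swaps_and_straights history (get_swaps_and_straights history)

-- ===== LEMMAS AND PROOFS =====

lemma pvPosMap_aux (v : Int) :
    ∀ (arr : List Int) (s : Int) (d : PySem.Dict Int Int),
      ((PySem.List.enumerate arr s).foldl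
        (fun d q => if d.contains q.2 then d else d.insert q.2 q.1) d).get? v
      = (d.get? v).or ((PySem.List.index? arr v).map (fun n => s + (n : Int))) := by
  intro arr
  induction arr with
  | nil => intro s d; simp [PySem.List.enumerate]
  | cons x arr ih =>
    intro s d
    rw [PySem.List.enumerate_cons, List.foldl_cons]
    by_cases hx : x = v
    · subst hx
      by_cases hc : d.contains x
      · rw [if_pos hc, ih]
        have hs : (d.get? x).isSome := by rw [← PySem.Dict.contains_eq_isSome_get?]; exact hc
        obtain ⟨w, hw⟩ := Option.isSome_iff_exists.mp hs
        simp [hw]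
      · rw [if_neg (by simpa using hc), ih]
        have hn : d.get? x = none := by
          rw [PySem.Dict.get?_eq_none_iff_contains]; simpa using hc
        rw [PySem.List.index?_cons_self]
        simp [hn, PySem.Dict.get?_insert_self]
    · have step : (if d.contains x then d else d.insert x s).get? v = d.get? v := by
        by_cases hc : d.contains x
        · simp [hc]
        · rw [if_neg (by simpa using hc)]
          exact PySem.Dict.get?_insert_of_ne _ _ (fun hh => hx hh.symm)
      rw [ih, step, PySem.List.index?_cons_of_ne _ hx]
      cases hidx : PySem.List.index? arr v with
      | none => simp
      | some n =>
        simp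
        congr 1
        ring

lemma pvPosMap_getD (arr : List Int) (v : Int) :
    (pvPosMap arr).getD v 0 = (((PySem.List.index? arr v).getD 0 : Nat) : Int) := by
  rw [PySem.Dict.getD_eq_get?_getD, pvPosMap, pvPosMap_aux]
  cases hidx : PySem.List.index? arr v with
  | none => simp [PySem.Dict.get?_empty]
  | some n => simp [PySem.Dict.get?_empty]

lemma pvDictFold {V : Type} (f : Int → V) :
    ∀ (ks : List Int) (D : List Int), D.Nodup →
      ((ks.foldl (fun d v => d.insert v (f v))
          (PySem.Dict.mk (D.map (fun v => (v, f v))))).items)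
      = (PySem.Set.update D ks).map (fun v => (v, f v)) := by
  intro ks
  induction ks with
  | nil => intro D hD; simp [PySem.Set.update]
  | cons v ks ih =>
    intro D hD
    rw [List.foldl_cons, PySem.Set.update_cons]
    have hcont : (PySem.Dict.mk (D.map (fun u => (u, f u)))).contains v = decide (v ∈ D) := by
      rw [PySem.Dict.contains_mk, List.any_map]
      by_cases hv : v ∈ D
      · simp only [hv, decide_true]
        rw [List.any_eq_true]
        exact ⟨v, hv, by simp⟩
      · simp only [hv, decide_false]
        rw [List.any_eq_false]
        intro u hu
        simp only [Function.comp_apply]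
        intro hh
        exact hv ((eq_of_beq hh) ▸ hu)
    by_cases hv : v ∈ D
    · have h1 : (PySem.Dict.mk (D.map (fun u => (u, f u)))).insert v (f v)
          = PySem.Dict.mk (D.map (fun u => (u, f u))) := by
        apply PySem.Dict.ext
        rw [PySem.Dict.items_insert, if_pos (by rw [hcont]; simpa using hv)]
        show (D.map _).map _ = _
        rw [List.map_map]
        apply List.map_congr_left
        intro u _
        by_cases huv : u = v
        · simp [huv]
        · simp [huv]
      rw [h1, PySem.Set.add_of_mem hv]
      exact ih D hD
    · have h1 : (PySem.Dict.mk (D.map (fun u => (u, f u)))).insert v (f v)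
          = PySem.Dict.mk ((D ++ [v]).map (fun u => (u, f u))) := by
        apply PySem.Dict.ext
        rw [PySem.Dict.items_insert, if_neg (by rw [hcont]; simpa using hv)]
        simp
      rw [h1, PySem.Set.add_of_not_mem hv]
      refine ih (D ++ [v]) ?_
      rw [List.nodup_append]
      exact ⟨hD, List.nodup_singleton v,
        by intro a ha b hb hab; rw [List.mem_singleton] at hb; exact hv ((hab.trans hb) ▸ ha)⟩

lemma pvFoldItems {V : Type} (f : Int → V) (ks : List Int) :
    (ks.foldl (fun d v => d.insert v (f v)) PySem.Dict.empty).items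
    = (PySem.Set.ofList ks).map (fun v => (v, f v)) := by
  have h0 : (PySem.Dict.empty : PySem.Dict Int V)
      = PySem.Dict.mk (([] : List Int).map (fun v => (v, f v))) := rfl
  rw [h0, pvDictFold f ks [] List.nodup_nil]
  rfl

-- modify is Python's d[k] = f(d.get(k, dflt))
lemma pvModify_eq {V : Type} (d : PySem.Dict Int V) (k : Int) (dflt : V) (f : V → V) :
    d.modify k dflt f = d.insert k (f (d.getD k dflt)) := rfl


-- ----- B-side proof helpers -----

-- the effect of one frame on a single value's (swap-list, last-position) state
def pvPerStep (v : Int) (ac : List pvE × (Int × Int)) (q : Int × List Int) : List pvE × (Int × Int) :=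
  let p := (pvPosMap q.2).getD v 0
  ((if p ≠ ac.2.1 then ac.1 ++ [((some ac.2.1, some ac.2.2), (some p, some q.1))] else ac.1), (p, q.1))

-- value of the swap list after one frame, as a function of the previous per-value state
def pvS' (pos : PySem.Dict Int Int) (i : Int) (S : Int → List pvE) (T : Int → Int × Int) (v : Int) : List pvE :=
  if pos.getD v 0 ≠ (T v).1 then
    S v ++ [((some (T v).1, some (T v).2), (some (pos.getD v 0), some i))]
  else S v

lemma pvGetD_map {V : Type} (F : Int → V) (K : List Int) (hK : K.Nodup) (v : Int) (hv : v ∈ K) (d0 : V) :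
    (PySem.Dict.mk (K.map (fun u => (u, F u)))).getD v d0 = F v := by
  have hmem : (v, F v) ∈ (PySem.Dict.mk (K.map (fun u => (u, F u)))).items := by
    show (v, F v) ∈ K.map (fun u => (u, F u))
    exact List.mem_map.mpr ⟨v, hv, rfl⟩
  have hnd : (PySem.Dict.mk (K.map (fun u => (u, F u)))).keys.Nodup := by
    show ((K.map (fun u => (u, F u))).map Prod.fst).Nodup
    simpa [List.map_map, Function.comp_def] using hK
  exact PySem.Dict.getD_of_mem_items _ hmem hnd d0

lemma pvGetD_mid {V : Type} (F G : Int → V) (done ks : List Int) (v : Int) (x : V) (d0 : V)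
    (h : (done ++ v :: ks).Nodup) :
    (PySem.Dict.mk (done.map (fun u => (u, F u)) ++ (v, x) :: ks.map (fun u => (u, G u)))).getD v d0 = x := by
  have hmem : (v, x) ∈ (PySem.Dict.mk (done.map (fun u => (u, F u)) ++ (v, x) :: ks.map (fun u => (u, G u)))).items := by
    show (v, x) ∈ done.map (fun u => (u, F u)) ++ (v, x) :: ks.map (fun u => (u, G u))
    simp
  have hnd : (PySem.Dict.mk (done.map (fun u => (u, F u)) ++ (v, x) :: ks.map (fun u => (u, G u)))).keys.Nodup := by
    show ((done.map (fun u => (u, F u)) ++ (v, x) :: ks.map (fun u => (u, G u))).map Prod.fst).Nodup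
    simpa [List.map_map, Function.comp_def] using h
  exact PySem.Dict.getD_of_mem_items _ hmem hnd d0

lemma pvInsert_mid {V : Type} (F G : Int → V) (done ks : List Int) (v : Int) (x y : V)
    (hvd : v ∉ done) (hvk : v ∉ ks) :
    (PySem.Dict.mk (done.map (fun u => (u, F u)) ++ (v, x) :: ks.map (fun u => (u, G u)))).insert v y
      = PySem.Dict.mk (done.map (fun u => (u, F u)) ++ (v, y) :: ks.map (fun u => (u, G u))) := by
  apply PySem.Dict.ext
  rw [PySem.Dict.items_insert, if_pos ?hc]
  case hc =>
    rw [PySem.Dict.contains_mk]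
    refine List.any_eq_true.mpr ⟨(v, x), by simp, by simp⟩
  show (_ ++ _ :: _).map _ = _
  rw [List.map_append, List.map_cons]
  congr 1
  · rw [List.map_map]
    apply List.map_congr_left
    intro u hu
    have hne : u ≠ v := fun e => hvd (e ▸ hu)
    simp [hne]
  · congr 1
    · simp
    · rw [List.map_map]
      apply List.map_congr_left
      intro u hu
      have hne : u ≠ v := fun e => hvk (e ▸ hu)
      simp [hne]

lemma pvFrameAux (pos : PySem.Dict Int Int) (i : Int) (S : Int → List pvE) (T : Int → Int × Int) :
    ∀ (ks done : List Int), (done ++ ks).Nodup →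
      ks.foldl (pvInnerStep pos i)
        (PySem.Dict.mk (done.map (fun v => (v, pvS' pos i S T v)) ++ ks.map (fun v => (v, S v))),
         PySem.Dict.mk (done.map (fun v => (v, (pos.getD v 0, i))) ++ ks.map (fun v => (v, T v))))
      = (PySem.Dict.mk ((done ++ ks).map (fun v => (v, pvS' pos i S T v))),
         PySem.Dict.mk ((done ++ ks).map (fun v => (v, (pos.getD v 0, i))))) := by
  intro ks
  induction ks with
  | nil => intro done h; simp
  | cons v ks ih =>
    intro done h
    have h' := h
    rw [List.nodup_append] at h'
    obtain ⟨hd, hvks, hdisj⟩ := h'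
    have hvdone : v ∉ done := fun hin => hdisj v hin v (List.mem_cons_self) rfl
    have hvk : v ∉ ks := (List.nodup_cons.mp hvks).1
    rw [List.foldl_cons]
    have hstep :
        pvInnerStep pos i
          (PySem.Dict.mk (done.map (fun u => (u, pvS' pos i S T u)) ++ (v :: ks).map (fun u => (u, S u))),
           PySem.Dict.mk (done.map (fun u => (u, (pos.getD u 0, i))) ++ (v :: ks).map (fun u => (u, T u)))) v
        = (PySem.Dict.mk (done.map (fun u => (u, pvS' pos i S T u)) ++ (v, pvS' pos i S T v) :: ks.map (fun u => (u, S u))),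
           PySem.Dict.mk (done.map (fun u => (u, (pos.getD u 0, i))) ++ (v, (pos.getD v 0, i)) :: ks.map (fun u => (u, T u)))) := by
      show pvInnerStep pos i
          (PySem.Dict.mk (done.map (fun u => (u, pvS' pos i S T u)) ++ (v, S v) :: ks.map (fun u => (u, S u))),
           PySem.Dict.mk (done.map (fun u => (u, (pos.getD u 0, i))) ++ (v, T v) :: ks.map (fun u => (u, T u)))) v = _
      unfold pvInnerStep
      simp only []
      rw [pvGetD_mid _ _ done ks v (T v) (0, 0) h]
      rw [pvInsert_mid _ _ done ks v (T v) (pos.getD v 0, i) hvdone hvk]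
      by_cases hc : pos.getD v 0 ≠ (T v).1
      · rw [if_pos hc, pvModify_eq, pvGetD_mid _ _ done ks v (S v) [] h,
            pvInsert_mid _ _ done ks v (S v) _ hvdone hvk]
        have : pvS' pos i S T v
            = S v ++ [((some (T v).1, some (T v).2), (some (pos.getD v 0), some i))] := by
          rw [pvS', if_pos hc]
        rw [this]
      · rw [if_neg hc]
        have : pvS' pos i S T v = S v := by rw [pvS', if_neg hc]
        rw [this]
    rw [hstep]
    have := ih (done ++ [v]) (by simpa using h)
    simpa [List.map_append] using this


lemma pvInitAux (pos0 : PySem.Dict Int Int) :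
    ∀ (ks D : List Int), D.Nodup →
      ks.foldl (fun st v =>
          if st.1.contains v then st
          else (st.1.insert v [(((none, none) : Option Int × Option Int), (some (pos0.getD v 0), (some (0 : Int) : Option Int)))],
                st.2.insert v ((pos0.getD v 0, (0 : Int)) : Int × Int)))
        (PySem.Dict.mk (D.map (fun v => (v, [(((none, none) : Option Int × Option Int), (some (pos0.getD v 0), (some (0 : Int) : Option Int)))]))),
         PySem.Dict.mk (D.map (fun v => (v, ((pos0.getD v 0, (0 : Int)) : Int × Int)))))
      = (PySem.Dict.mk ((PySem.Set.update D ks).map (fun v => (v, [(((none, none) : Option Int × Option Int), (some (pos0.getD v 0), (some (0 : Int) : Option Int)))]))),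
         PySem.Dict.mk ((PySem.Set.update D ks).map (fun v => (v, ((pos0.getD v 0, (0 : Int)) : Int × Int))))) := by
  intro ks
  induction ks with
  | nil => intro D hD; simp [PySem.Set.update]
  | cons v ks ih =>
    intro D hD
    rw [List.foldl_cons, PySem.Set.update_cons]
    have hcont : ∀ {V : Type} (f : Int → V),
        (PySem.Dict.mk (D.map (fun u => (u, f u)))).contains v = decide (v ∈ D) := by
      intro V f
      rw [PySem.Dict.contains_mk, List.any_map]
      by_cases hv : v ∈ D
      · simp only [hv, decide_true]
        rw [List.any_eq_true]
        exact ⟨v, hv, by simp⟩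
      · simp only [hv, decide_false]
        rw [List.any_eq_false]
        intro u hu
        simp only [Function.comp_apply]
        intro hh
        exact hv ((eq_of_beq hh) ▸ hu)
    by_cases hv : v ∈ D
    · rw [if_pos (by rw [hcont]; simpa using hv), PySem.Set.add_of_mem hv]
      exact ih D hD
    · rw [if_neg (by rw [hcont]; simpa using hv)]
      have hfresh : ∀ {V : Type} (f : Int → V) (y : V),
          (PySem.Dict.mk (D.map (fun u => (u, f u)))).insert v y
            = PySem.Dict.mk (D.map (fun u => (u, f u)) ++ [(v, y)]) := by
        intro V f y
        apply PySem.Dict.ext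
        rw [PySem.Dict.items_insert, if_neg (by rw [hcont]; simpa using hv)]
      rw [hfresh, hfresh, PySem.Set.add_of_not_mem hv]
      have hD' : (D ++ [v]).Nodup := by
        rw [List.nodup_append]
        exact ⟨hD, List.nodup_singleton v,
          by intro a ha b hb hab; rw [List.mem_singleton] at hb; exact hv ((hab ▸ hb) ▸ ha)⟩
      have := ih (D ++ [v]) hD'
      simpa [List.map_append] using this

lemma pvFinalAux (x : Int → pvE) (S : Int → List pvE) :
    ∀ (ks done : List Int), (done ++ ks).Nodup →
      ks.foldl (fun d v => d.modify v [] (fun l => l ++ [x v]))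
        (PySem.Dict.mk (done.map (fun v => (v, S v ++ [x v])) ++ ks.map (fun v => (v, S v))))
      = PySem.Dict.mk ((done ++ ks).map (fun v => (v, S v ++ [x v]))) := by
  intro ks
  induction ks with
  | nil => intro done h; simp
  | cons v ks ih =>
    intro done h
    have h' := h
    rw [List.nodup_append] at h'
    obtain ⟨hd, hvks, hdisj⟩ := h'
    have hvdone : v ∉ done := fun hin => hdisj v hin v (List.mem_cons_self) rfl
    have hvk : v ∉ ks := (List.nodup_cons.mp hvks).1
    rw [List.foldl_cons]
    have hstep :
        (PySem.Dict.mk (done.map (fun u => (u, S u ++ [x u])) ++ (v :: ks).map (fun u => (u, S u)))).modify v []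
            (fun l => l ++ [x v])
        = PySem.Dict.mk (done.map (fun u => (u, S u ++ [x u])) ++ (v, S v ++ [x v]) :: ks.map (fun u => (u, S u))) := by
      show (PySem.Dict.mk (done.map (fun u => (u, S u ++ [x u])) ++ (v, S v) :: ks.map (fun u => (u, S u)))).modify v []
            (fun l => l ++ [x v]) = _
      rw [pvModify_eq, pvGetD_mid _ _ done ks v (S v) [] h,
          pvInsert_mid _ _ done ks v (S v) (S v ++ [x v]) hvdone hvk]
    rw [hstep]
    have := ih (done ++ [v]) (by simpa using h)
    simpa [List.map_append] using this

lemma pvOuterAux :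
    ∀ (L : List (Int × List Int)) (K : List Int), K.Nodup → ∀ (S : Int → List pvE) (T : Int → Int × Int),
      L.foldl pvFrameStep
        (PySem.Dict.mk (K.map (fun v => (v, S v))), PySem.Dict.mk (K.map (fun v => (v, T v))))
      = (PySem.Dict.mk (K.map (fun v => (v, (L.foldl (pvPerStep v) (S v, T v)).1))),
         PySem.Dict.mk (K.map (fun v => (v, (L.foldl (pvPerStep v) (S v, T v)).2)))) := by
  intro L
  induction L with
  | nil => intro K hK S T; simp
  | cons q L ih =>
    intro K hK S T
    rw [List.foldl_cons]
    have hkeys : (PySem.Dict.mk (K.map (fun v => (v, S v)))).keys = K := by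
      show (K.map (fun v => (v, S v))).map Prod.fst = K
      simp [List.map_map, Function.comp_def]
    have hframe : pvFrameStep
        (PySem.Dict.mk (K.map (fun v => (v, S v))), PySem.Dict.mk (K.map (fun v => (v, T v)))) q
        = (PySem.Dict.mk (K.map (fun v => (v, pvS' (pvPosMap q.2) q.1 S T v))),
           PySem.Dict.mk (K.map (fun v => (v, ((pvPosMap q.2).getD v 0, q.1))))) := by
      show (PySem.Dict.mk (K.map (fun v => (v, S v)))).keys.foldl
          (pvInnerStep (pvPosMap q.2) q.1)
          (PySem.Dict.mk (K.map (fun v => (v, S v))), PySem.Dict.mk (K.map (fun v => (v, T v)))) = _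
      rw [hkeys]
      have := pvFrameAux (pvPosMap q.2) q.1 S T K [] (by simpa using hK)
      simpa using this
    rw [hframe, ih K hK]
    have hpt : ∀ v : Int,
        pvPerStep v (S v, T v) q = (pvS' (pvPosMap q.2) q.1 S T v, ((pvPosMap q.2).getD v 0, q.1)) := by
      intro v
      simp [pvPerStep, pvS']
    have e1 : ∀ v, (q :: L).foldl (pvPerStep v) (S v, T v)
        = L.foldl (pvPerStep v) (pvS' (pvPosMap q.2) q.1 S T v, ((pvPosMap q.2).getD v 0, q.1)) := by
      intro v
      rw [List.foldl_cons, hpt v]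
    simp only [Prod.mk.injEq]
    refine ⟨congrArg PySem.Dict.mk ?_, congrArg PySem.Dict.mk ?_⟩ <;>
      · apply List.map_congr_left
        intro v _
        rw [e1 v]

lemma pvPerValueAux (v : Int) :
    ∀ (rest : List (List Int)) (s : Int) (e : Int × Int) (acc : List pvE),
      (PySem.List.enumerate rest s).foldl (pvPerStep v) (acc, e)
      = (acc ++ (((e :: ((PySem.List.enumerate rest s).map (fun q => ((((PySem.List.index? q.2 v).getD 0 : Nat) : Int), q.1)))).zip
              ((PySem.List.enumerate rest s).map (fun q => ((((PySem.List.index? q.2 v).getD 0 : Nat) : Int), q.1)))).filter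
              (fun q => decide (q.1.1 ≠ q.2.1))).map (fun q => (pvLift q.1, pvLift q.2)),
         (e :: ((PySem.List.enumerate rest s).map (fun q => ((((PySem.List.index? q.2 v).getD 0 : Nat) : Int), q.1)))).getLastD (0, 0)) := by
  intro rest
  induction rest with
  | nil => intro s e acc; simp [PySem.List.enumerate]
  | cons a rest ih =>
    intro s e acc
    rw [PySem.List.enumerate_cons, List.foldl_cons, List.map_cons]
    have hstep : pvPerStep v (acc, e) (s, a)
        = ((if (((PySem.List.index? a v).getD 0 : Nat) : Int) ≠ e.1 then
              acc ++ [((some e.1, some e.2), (some (((PySem.List.index? a v).getD 0 : Nat) : Int), some s))]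
            else acc),
           ((((PySem.List.index? a v).getD 0 : Nat) : Int), s)) := by
      simp [pvPerStep, pvPosMap_getD]
    rw [hstep]
    generalize (((PySem.List.index? a v).getD 0 : Nat) : Int) = w
    by_cases hc : w ≠ e.1
    · rw [if_pos hc, ih]
      simp only [List.zip_cons_cons, List.filter_cons]
      have h2 : e.1 ≠ w := fun hh => hc hh.symm
      simp [h2, pvLift]
    · rw [if_neg hc, ih]
      simp only [List.zip_cons_cons, List.filter_cons]
      have h2 : ¬ e.1 ≠ w := by
        intro hh; exact hh (Eq.symm (of_not_not hc))
      simp [h2]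

-- per-value outcome of the streaming pass
def pvFoldV (h : List Int) (rest : List (List Int)) (v : Int) : List pvE × (Int × Int) :=
  (PySem.List.enumerate rest 1).foldl (pvPerStep v)
    ([(((none, none) : Option Int × Option Int), (some ((pvPosMap h).getD v 0), some 0))],
     ((pvPosMap h).getD v 0, 0))

lemma pvFoldV_swap (h : List Int) (rest : List (List Int)) (v : Int) :
    (pvFoldV h rest v).1
      ++ [((some (pvFoldV h rest v).2.1, some (pvFoldV h rest v).2.2),
           ((none, none) : Option Int × Option Int))]
    = pvSwapOf (pvMovement (h :: rest) v) := by
  have hm : pvMovement (h :: rest) v = ((((PySem.List.index? h v).getD 0 : Nat) : Int), 0) ::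
      (PySem.List.enumerate rest 1).map (fun q => ((((PySem.List.index? q.2 v).getD 0 : Nat) : Int), q.1)) := by
    rw [pvMovement, PySem.List.enumerate_cons, List.map_cons]
    norm_num
  unfold pvFoldV
  rw [pvPerValueAux]
  rw [pvSwapOf, hm]
  simp [pvPosMap_getD, pvLift]

-- ===== VERDICT (by name: the statement is the Claim_ definition above) =====
theorem get_swaps_and_straights_spec : Claim_equal_get_swaps_and_straights := by
  intro history _ _
  unfold Spec_get_swaps_and_straights
  simp only [get_swaps_and_straights, get_swaps_and_straights_alt]
  -- A side
  rw [pvFoldItems (fun v => pvMovement (history.headD [] :: (history ++ [history.getLastD []])) v) (history.headD [])]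
  rw [List.foldl_map]
  rw [pvFoldItems (fun v => pvSwapOf (pvMovement (history.headD [] :: (history ++ [history.getLastD []])) v)) (PySem.Set.ofList (history.headD []))]
  rw [PySem.Set.ofList_ofList]
  rw [List.foldl_map]
  rw [pvFoldItems (fun v => pvStraightOf (pvSwapOf (pvMovement (history.headD [] :: (history ++ [history.getLastD []])) v))) (PySem.Set.ofList (history.headD []))]
  rw [PySem.Set.ofList_ofList]
  -- B side: the i == 0 iteration
  have hinit : pvInitLoop (pvPosMap (history.headD [])) (history.headD [])
      = (PySem.Dict.mk ((PySem.Set.ofList (history.headD [])).map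
            (fun v => (v, [(((none, none) : Option Int × Option Int),
                            (some ((pvPosMap (history.headD [])).getD v 0), some 0))]))),
         PySem.Dict.mk ((PySem.Set.ofList (history.headD [])).map
            (fun v => (v, ((pvPosMap (history.headD [])).getD v 0, 0))))) := by
    have := pvInitAux (pvPosMap (history.headD [])) (history.headD []) [] List.nodup_nil
    simpa [pvInitLoop, PySem.Set.update_nil_left] using this
  rw [hinit]
  simp only [List.tail_cons]
  -- B side: the streaming pass, value by value
  have houter := pvOuterAux (PySem.List.enumerate (history ++ [history.getLastD []]) 1)
      (PySem.Set.ofList (history.headD []))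
      (PySem.Set.nodup_ofList _)
      (fun v => [(((none, none) : Option Int × Option Int),
                  (some ((pvPosMap (history.headD [])).getD v 0), some (0 : Int)))])
      (fun v => ((pvPosMap (history.headD [])).getD v 0, (0 : Int)))
  simp only [] at houter
  rw [houter]
  have hkeys : (PySem.Dict.mk ((PySem.Set.ofList (history.headD [])).map
      (fun v => (v, ((PySem.List.enumerate (history ++ [history.getLastD []]) 1).foldl (pvPerStep v)
        ([(((none, none) : Option Int × Option Int),
           (some ((pvPosMap (history.headD [])).getD v 0), some (0 : Int)))],
         ((pvPosMap (history.headD [])).getD v 0, (0 : Int)))).1)))).keys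
      = PySem.Set.ofList (history.headD []) := by
    show ((PySem.Set.ofList (history.headD [])).map _).map Prod.fst = _
    simp [List.map_map, Function.comp_def]
  rw [hkeys]
  have hfin := pvFinalAux
      (fun v => ((some ((PySem.Dict.mk ((PySem.Set.ofList (history.headD [])).map
            (fun u => (u, ((PySem.List.enumerate (history ++ [history.getLastD []]) 1).foldl (pvPerStep u)
              ([(((none, none) : Option Int × Option Int),
                 (some ((pvPosMap (history.headD [])).getD u 0), some (0 : Int)))],
               ((pvPosMap (history.headD [])).getD u 0, (0 : Int)))).2)))).getD v (0, 0)).1,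
          some ((PySem.Dict.mk ((PySem.Set.ofList (history.headD [])).map
            (fun u => (u, ((PySem.List.enumerate (history ++ [history.getLastD []]) 1).foldl (pvPerStep u)
              ([(((none, none) : Option Int × Option Int),
                 (some ((pvPosMap (history.headD [])).getD u 0), some (0 : Int)))],
               ((pvPosMap (history.headD [])).getD u 0, (0 : Int)))).2)))).getD v (0, 0)).2),
         ((none, none) : Option Int × Option Int)))
      (fun v => ((PySem.List.enumerate (history ++ [history.getLastD []]) 1).foldl (pvPerStep v)
        ([(((none, none) : Option Int × Option Int),
           (some ((pvPosMap (history.headD [])).getD v 0), some (0 : Int)))],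
         ((pvPosMap (history.headD [])).getD v 0, (0 : Int)))).1)
      (PySem.Set.ofList (history.headD [])) []
      (by simp [PySem.Set.nodup_ofList])
  simp only [List.map_nil, List.nil_append] at hfin
  rw [hfin]
  have hitems : ∀ {V : Type} (l : List (Int × V)), (PySem.Dict.mk l).items = l := fun _ => rfl
  rw [hitems, List.foldl_map]
  rw [pvFoldItems (fun v => pvStraightB ((((PySem.List.enumerate (history ++ [history.getLastD []]) 1).foldl (pvPerStep v)
        ([(((none, none) : Option Int × Option Int),
           (some ((pvPosMap (history.headD [])).getD v 0), some (0 : Int)))],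
         ((pvPosMap (history.headD [])).getD v 0, (0 : Int)))).1) ++ _)) (PySem.Set.ofList (history.headD []))]
  rw [PySem.Set.ofList_ofList]
  have hget := pvGetD_map (fun u => ((PySem.List.enumerate (history ++ [history.getLastD []]) 1).foldl (pvPerStep u)
        ([(((none, none) : Option Int × Option Int),
           (some ((pvPosMap (history.headD [])).getD u 0), some (0 : Int)))],
         ((pvPosMap (history.headD [])).getD u 0, (0 : Int)))).2)
      (PySem.Set.ofList (history.headD [])) (PySem.Set.nodup_ofList _)
  simp only [] at hget
  simp only [Prod.mk.injEq]
  constructor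
  · apply List.map_congr_left
    intro v hv
    rw [hget v hv (0, 0)]
    have hswap := pvFoldV_swap (history.headD []) (history ++ [history.getLastD []]) v
    unfold pvFoldV at hswap
    rw [hswap]
  · apply List.map_congr_left
    intro v hv
    rw [hget v hv (0, 0)]
    have hswap := pvFoldV_swap (history.headD []) (history ++ [history.getLastD []]) v
    unfold pvFoldV at hswap
    rw [hswap]
    rfl
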